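-- pv_equiv track=rewrite | github.com/jm4ch4do/m4ch4do_myCWs | 5kyu/find_common_den.py | find_highest_common
-- ===== SOURCE A (Python) =====
-- def find_highest_common(list1, list2):
--     """
--     Finds highest common number in both lists
--     """
--
--     # use shorter list for searching
--     if len(list1) <= len(list2):
--         shorter, longer = list1, list2
--     else:
--         shorter, longer = list2, list1
--
--     hcommon = 0
--     for value in shorter:
--         if value in longer and value > hcommon:
--             hcommon = value
--
--     return hcommon if hcommon else None
-- ===== SOURCE B (Python) =====
-- def find_highest_common(list1, list2):
--     """
--     Finds highest common number in both lists
--     (two-pointer walk over descending-sorted copies)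
--     """
--     xs = sorted(list1, reverse=True)
--     ys = sorted(list2, reverse=True)
--     i = j = 0
--     common = None
--     while i < len(xs) and j < len(ys):
--         if xs[i] == ys[j]:
--             common = xs[i]
--             break
--         if xs[i] > ys[j]:
--             i += 1
--         else:
--             j += 1
--     return common if common is not None and common > 0 else None
-- ===== Notes on version B (the rewrite author's own statement) =====
-- stated objective: faster
-- what changed: Replaced the membership-scan loop (for each element of the shorter list, scan the longer list and track the running positive max) by sorting copies of both lists in descending order and walking them with two pointers, stopping at the first (hence largest) equal pair.
import Mathlib
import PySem

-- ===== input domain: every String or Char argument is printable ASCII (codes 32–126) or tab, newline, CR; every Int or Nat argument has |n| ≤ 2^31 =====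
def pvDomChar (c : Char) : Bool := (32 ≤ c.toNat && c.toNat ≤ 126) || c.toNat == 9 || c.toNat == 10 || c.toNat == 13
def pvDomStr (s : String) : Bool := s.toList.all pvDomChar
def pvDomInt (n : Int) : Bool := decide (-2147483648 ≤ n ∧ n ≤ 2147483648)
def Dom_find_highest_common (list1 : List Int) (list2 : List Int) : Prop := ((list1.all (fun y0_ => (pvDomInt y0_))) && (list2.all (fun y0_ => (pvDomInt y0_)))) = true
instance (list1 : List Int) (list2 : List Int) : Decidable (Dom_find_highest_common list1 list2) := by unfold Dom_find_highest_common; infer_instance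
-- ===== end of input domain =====

-- B replaces A's membership-scan running-max loop by a two-pointer walk over
-- descending-sorted copies of both lists (alternative algorithm, same results).


-- ===== PORT A =====
def find_highest_common (list1 : List Int) (list2 : List Int) : Option Int :=
  -- use shorter list for searching
  let sl := if list1.length ≤ list2.length then (list1, list2) else (list2, list1)
  let shorter := sl.1
  let longer := sl.2
  let hcommon := shorter.foldl (fun hc v => if v ∈ longer ∧ v > hc then v else hc) 0
  -- 'return hcommon if hcommon else None' : truthiness of an int is ≠ 0
  if hcommon ≠ 0 then some hcommon else none

-- ===== PORT B =====
-- the while-loop with pointers i, j, transcribed as recursion on the list tails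
def fhcGo : List Int → List Int → Option Int
  | x :: xs, y :: ys =>
    if x = y then some x
    else if x > y then fhcGo xs (y :: ys)
    else fhcGo (x :: xs) ys
  | _, _ => none

def find_highest_common_alt (list1 : List Int) (list2 : List Int) : Option Int :=
  let xs := PySem.List.sorted list1 (fun v => v) true
  let ys := PySem.List.sorted list2 (fun v => v) true
  match fhcGo xs ys with
  | some c => if c > 0 then some c else none
  | none => none

-- ===== PRECONDITION & SPEC =====
def Spec_find_highest_common (list1 : List Int) (list2 : List Int) (out : Option Int) : Prop := out = find_highest_common_alt list1 list2
instance (list1 : List Int) (list2 : List Int) (out : Option Int) : Decidable (Spec_find_highest_common list1 list2 out) := by unfold Spec_find_highest_common; infer_instance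

-- ===== CLAIM (what is proved, stated in full; the proofs are below) =====
def Claim_equal_find_highest_common : Prop := ∀ (list1 : List Int) (list2 : List Int), Dom_find_highest_common list1 list2 → Spec_find_highest_common list1 list2 (find_highest_common list1 list2)

-- ===== LEMMAS AND PROOFS =====

-- A's loop body only ever raises the accumulator
theorem fhc_fold_le (longer : List Int) :
    ∀ (s : List Int) (a : Int),
      a ≤ s.foldl (fun hc v => if v ∈ longer ∧ v > hc then v else hc) a := by
  intro s
  induction s with
  | nil => intro a; simp
  | cons x t ih =>
    intro a
    simp only [List.foldl_cons]
    split_ifs with h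
    · exact le_trans (le_of_lt h.2) (ih x)
    · exact ih a

-- characterisation of A's running-max loop
theorem fhc_fold_spec (longer : List Int) :
    ∀ (s : List Int) (a : Int),
      (s.foldl (fun hc v => if v ∈ longer ∧ v > hc then v else hc) a = a ∨
        (s.foldl (fun hc v => if v ∈ longer ∧ v > hc then v else hc) a ∈ s ∧
         s.foldl (fun hc v => if v ∈ longer ∧ v > hc then v else hc) a ∈ longer)) ∧
      (∀ v ∈ s, v ∈ longer →
        v ≤ s.foldl (fun hc v => if v ∈ longer ∧ v > hc then v else hc) a) := by
  intro s
  induction s with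
  | nil => intro a; simp
  | cons x t ih =>
    intro a
    simp only [List.foldl_cons]
    constructor
    · split_ifs with h
      · rcases (ih x).1 with h1 | h1
        · exact Or.inr ⟨by simp [h1], by rw [h1]; exact h.1⟩
        · exact Or.inr ⟨List.mem_cons_of_mem _ h1.1, h1.2⟩
      · rcases (ih a).1 with h1 | h1
        · exact Or.inl h1
        · exact Or.inr ⟨List.mem_cons_of_mem _ h1.1, h1.2⟩
    · intro v hv hvl
      rcases List.mem_cons.1 hv with rfl | hvt
      · split_ifs with h
        · exact fhc_fold_le longer t v
        · have : v ≤ a := by by_contra hva; exact h ⟨hvl, by omega⟩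
          exact le_trans this (fhc_fold_le longer t a)
      · split_ifs with h
        · exact (ih x).2 v hvt hvl
        · exact (ih a).2 v hvt hvl

-- two-pointer walk on descending lists: the result is a maximum common element,
-- and 'none' means the lists share no element
theorem fhcGo_spec :
    ∀ (xs ys : List Int), xs.Pairwise (· ≥ ·) → ys.Pairwise (· ≥ ·) →
      (∀ c, fhcGo xs ys = some c →
        c ∈ xs ∧ c ∈ ys ∧ ∀ v ∈ xs, v ∈ ys → v ≤ c) ∧
      (fhcGo xs ys = none → ∀ v ∈ xs, v ∉ ys) := by
  intro xs ys
  fun_induction fhcGo xs ys with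
  | case1 xs y ys =>
    intro hx hy
    refine ⟨?_, by simp⟩
    intro c hc
    simp only [Option.some.injEq] at hc
    subst hc
    refine ⟨List.mem_cons_self, List.mem_cons_self, ?_⟩
    intro v hv _
    rcases List.mem_cons.1 hv with rfl | hvt
    · exact le_refl _
    · exact (List.pairwise_cons.1 hx).1 v hvt
  | case2 x xs y ys hne hgt ih =>
    intro hx hy
    have hx' := (List.pairwise_cons.1 hx).2
    have hxnot : x ∉ y :: ys := by
      intro hmem
      rcases List.mem_cons.1 hmem with rfl | hmem'
      · exact absurd hgt (lt_irrefl _)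
      · exact absurd (lt_of_le_of_lt ((List.pairwise_cons.1 hy).1 x hmem') hgt) (lt_irrefl _)
    have IH := ih hx' hy
    constructor
    · intro c hc
      obtain ⟨h1, h2, h3⟩ := IH.1 c hc
      refine ⟨List.mem_cons_of_mem _ h1, h2, ?_⟩
      intro v hv hvy
      rcases List.mem_cons.1 hv with rfl | hvt
      · exact absurd hvy hxnot
      · exact h3 v hvt hvy
    · intro hn v hv
      rcases List.mem_cons.1 hv with rfl | hvt
      · exact hxnot
      · exact IH.2 hn v hvt
  | case3 x xs y ys hne hngt ih =>
    intro hx hy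
    have hy' := (List.pairwise_cons.1 hy).2
    have hlt : x < y := lt_of_le_of_ne (le_of_not_gt hngt) hne
    have hynot : y ∉ x :: xs := by
      intro hmem
      rcases List.mem_cons.1 hmem with rfl | hmem'
      · exact absurd hlt (lt_irrefl _)
      · exact absurd (lt_of_le_of_lt ((List.pairwise_cons.1 hx).1 y hmem') hlt) (lt_irrefl _)
    have IH := ih hx hy'
    constructor
    · intro c hc
      obtain ⟨h1, h2, h3⟩ := IH.1 c hc
      refine ⟨h1, List.mem_cons_of_mem _ h2, ?_⟩
      intro v hv hvy
      rcases List.mem_cons.1 hvy with rfl | hvt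
      · exact absurd hv hynot
      · exact h3 v hv hvt
    · intro hn v hv hvy
      rcases List.mem_cons.1 hvy with rfl | hvt
      · exact hynot hv
      · exact IH.2 hn v hv hvt
  | case4 xs ys h =>
    intro _ _
    refine ⟨fun c hc => absurd hc (by simp), fun _ v hv hvy => ?_⟩
    match xs, ys with
    | [], _ => exact absurd hv List.not_mem_nil
    | _ :: _, [] => exact absurd hvy List.not_mem_nil
    | a :: as, b :: bs => exact h a as b bs rfl rfl

-- ===== VERDICT (by name: the statement is the Claim_ definition above) =====
theorem find_highest_common_spec : Claim_equal_find_highest_common := by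
  intro list1 list2 _
  unfold Spec_find_highest_common find_highest_common find_highest_common_alt
  set xs := PySem.List.sorted list1 (fun v => v) true with hxs
  set ys := PySem.List.sorted list2 (fun v => v) true with hys
  have hxp : xs.Pairwise (· ≥ ·) := PySem.List.sorted_pairwise_rev list1 (fun v => v)
  have hyp : ys.Pairwise (· ≥ ·) := PySem.List.sorted_pairwise_rev list2 (fun v => v)
  have hmx : ∀ v : Int, v ∈ xs ↔ v ∈ list1 := fun v => PySem.List.mem_sorted list1 (fun v => v) true v
  have hmy : ∀ v : Int, v ∈ ys ↔ v ∈ list2 := fun v => PySem.List.mem_sorted list2 (fun v => v) true v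
  have hgo := fhcGo_spec xs ys hxp hyp
  -- common-membership of the shorter/longer pair vs (list1, list2)
  have hsl : ∀ v : Int,
      (v ∈ (if list1.length ≤ list2.length then (list1, list2) else (list2, list1)).1 ∧
       v ∈ (if list1.length ≤ list2.length then (list1, list2) else (list2, list1)).2) ↔
      (v ∈ list1 ∧ v ∈ list2) := by
    intro v; split_ifs
    · simp
    · simp; tauto
  simp only []
  set shorter := (if list1.length ≤ list2.length then (list1, list2) else (list2, list1)).1 with hsh
  set longer := (if list1.length ≤ list2.length then (list1, list2) else (list2, list1)).2 with hlo
  set r := shorter.foldl (fun hc v => if v ∈ longer ∧ v > hc then v else hc) 0 with hr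
  have hr0 : (0 : Int) ≤ r := fhc_fold_le longer shorter 0
  have hspec := fhc_fold_spec longer shorter 0
  cases hgocase : fhcGo xs ys with
  | none =>
    -- no common element at all
    have hnoc : ∀ v : Int, v ∈ list1 → v ∉ list2 := by
      intro v h1 h2
      exact hgo.2 hgocase v ((hmx v).2 h1) ((hmy v).2 h2)
    have hreq : r = 0 := by
      rcases hspec.1 with h | h
      · exact h
      · exact absurd ((hsl r).1 ⟨h.1, h.2⟩).2 (hnoc r ((hsl r).1 ⟨h.1, h.2⟩).1)
    simp [hreq]
  | some c =>
    obtain ⟨hc1, hc2, hcmax⟩ := hgo.1 c hgocase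
    have hcl1 : c ∈ list1 := (hmx c).1 hc1
    have hcl2 : c ∈ list2 := (hmy c).1 hc2
    have hcs : c ∈ shorter ∧ c ∈ longer := (hsl c).2 ⟨hcl1, hcl2⟩
    have hcr : c ≤ r := hspec.2 c hcs.1 hcs.2
    by_cases hcpos : c > 0
    · -- r is common (r ≥ c > 0 so r ≠ 0) and every common value ≤ c, so r = c
      have hrne : r ≠ 0 := by omega
      rcases hspec.1 with h | h
      · exact absurd h hrne
      · have hrc : r ≤ c := by
          have hcm := (hsl r).1 ⟨h.1, h.2⟩
          exact hcmax r ((hmx r).2 hcm.1) ((hmy r).2 hcm.2)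
        have hreqc : r = c := le_antisymm hrc hcr
        rw [hreqc] at hrne ⊢
        simp [hrne, hcpos]
    · -- every common value ≤ c ≤ 0, and 0 ≤ r, so r = 0
      have hreq : r = 0 := by
        rcases hspec.1 with h | h
        · exact h
        · have hcm := (hsl r).1 ⟨h.1, h.2⟩
          have : r ≤ c := hcmax r ((hmx r).2 hcm.1) ((hmy r).2 hcm.2)
          omega
      simp [hreq, hcpos]
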